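-- pv_equiv track=rewrite | github.com/eddieoz/nwc-agent | scripts/nwc_bolt11.py | _decode_timestamp
-- ===== SOURCE A (Python) =====
-- def _decode_timestamp(data_5bit):
--     """Extract timestamp (first 7 words = 35 bits)."""
--     if len(data_5bit) < 7:
--         return 0
--
--     bits = []
--     for w in data_5bit[:7]:
--         for i in range(4, -1, -1):
--             bits.append((w >> i) & 1)
--
--     ts = 0
--     for b in bits[:35]:
--         ts = (ts << 1) | b
--     return ts
-- ===== SOURCE B (Python) =====
-- def _decode_timestamp(data_5bit):
--     """Extract timestamp (first 7 words = 35 bits)."""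
--     if len(data_5bit) < 7:
--         return 0
--     ts = 0
--     for w in data_5bit[:7]:
--         ts = (ts << 5) | (w & 0x1f)
--     return ts
-- ===== Notes on version B (the rewrite author's own statement) =====
-- stated objective: simpler
-- what changed: Dropped the intermediate 35-element bits list and its two loops (nested bit extraction, then bit-by-bit accumulation): B folds the first 7 words directly into the accumulator five bits at a time with (ts << 5) | (w & 0x1f).
import Mathlib
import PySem

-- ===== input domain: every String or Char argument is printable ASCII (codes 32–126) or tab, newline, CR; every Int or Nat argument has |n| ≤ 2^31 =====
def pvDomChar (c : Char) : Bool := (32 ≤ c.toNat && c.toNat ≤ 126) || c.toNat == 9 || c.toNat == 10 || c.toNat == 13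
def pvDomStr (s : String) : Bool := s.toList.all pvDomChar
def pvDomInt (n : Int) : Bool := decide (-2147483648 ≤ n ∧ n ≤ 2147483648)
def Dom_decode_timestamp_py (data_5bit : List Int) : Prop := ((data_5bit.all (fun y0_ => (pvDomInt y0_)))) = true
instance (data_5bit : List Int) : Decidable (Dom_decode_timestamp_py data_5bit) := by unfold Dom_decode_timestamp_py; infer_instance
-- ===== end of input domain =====

-- B drops A's intermediate 35-element bits list and its two loops, folding the first
-- 7 words directly into the accumulator five bits at a time (objective: simpler).

-- ===== PORT A =====
-- Shift amounts i come from range(4,-1,-1), all nonnegative, so i.toNat is exact here.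
def decode_timestamp_py (data_5bit : List Int) : Int :=
  if data_5bit.length < 7 then 0
  else
    let bits : List Int :=
      (PySem.List.slice data_5bit none (some 7)).foldl
        (fun bits w =>
          (PySem.List.pyRange 4 (-1) (-1)).foldl
            (fun bits i => bits ++ [PySem.Int.band (w >>> i.toNat) 1]) bits)
        []
    (PySem.List.slice bits none (some 35)).foldl
      (fun ts b => PySem.Int.bor (ts <<< (1 : Nat)) b) 0

-- ===== PORT B =====
def decode_timestamp_py_alt (data_5bit : List Int) : Int :=
  if data_5bit.length < 7 then 0
  else
    (PySem.List.slice data_5bit none (some 7)).foldl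
      (fun ts w => PySem.Int.bor (ts <<< (5 : Nat)) (PySem.Int.band w 31)) 0

-- ===== PRECONDITION & SPEC =====
def Spec_decode_timestamp_py (data_5bit : List Int) (out : Int) : Prop := out = decode_timestamp_py_alt data_5bit
instance (data_5bit : List Int) (out : Int) : Decidable (Spec_decode_timestamp_py data_5bit out) := by unfold Spec_decode_timestamp_py; infer_instance

-- ===== CLAIM (what is proved, stated in full; the proofs are below) =====
def Claim_equal_decode_timestamp_py : Prop := ∀ (data_5bit : List Int), Dom_decode_timestamp_py data_5bit → Spec_decode_timestamp_py data_5bit (decode_timestamp_py data_5bit)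

-- ===== LEMMAS AND PROOFS =====

-- the 5 low bits of w, most significant first (A's inner loop output for one word)
def wordBits (w : Int) : List Int :=
  [PySem.Int.band (w >>> (4 : Nat)) 1, PySem.Int.band (w >>> (3 : Nat)) 1,
   PySem.Int.band (w >>> (2 : Nat)) 1, PySem.Int.band (w >>> (1 : Nat)) 1,
   PySem.Int.band (w >>> (0 : Nat)) 1]

theorem bit_eq (w : Int) (i : Nat) :
    PySem.Int.band (w >>> i) 1 = (w / 2 ^ i) % 2 := by
  rw [PySem.Int.band_one]
  have h : w >>> i = w / 2 ^ i := by
    rw [Int.shiftRight_eq_div_pow]; push_cast; ring_nf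
  rw [h]
  simp [PySem.Int.mod, Int.fmod_eq_emod]

theorem band31 (w : Int) : PySem.Int.band w 31 = w % 32 := by
  by_cases hw : 0 ≤ w
  · rw [PySem.Int.band_of_nonneg hw (by norm_num)]
    have h31 : (31 : Int).toNat = 31 := rfl
    rw [h31]
    generalize hm : w.toNat = m
    have h : m &&& 31 = m % 32 := by
      have := Nat.and_two_pow_sub_one_eq_mod m 5
      norm_num at this
      exact this
    rw [h]
    omega
  · unfold PySem.Int.band
    rw [if_neg hw, if_pos (by norm_num : (0:Int) ≤ 31)]
    have h31 : (31 : Int).toNat = 31 := rfl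
    rw [h31]
    generalize hm : (-w - 1).toNat = m
    have h : 31 &&& m = m % 32 := by
      rw [Nat.and_comm]
      have := Nat.and_two_pow_sub_one_eq_mod m 5
      norm_num at this
      exact this
    rw [h]
    omega

theorem natlor : ∀ (k : Nat), ∀ (n r : Nat), r < 2 ^ k → (n <<< k) ||| r = 2 ^ k * n + r := by
  intro k
  induction k with
  | zero => intro n r hr; interval_cases r; simp
  | succ k ih =>
    intro n r hr
    have hb : r = Nat.bit (decide (r % 2 = 1)) (r / 2) := by
      rcases Nat.mod_two_eq_zero_or_one r with h | h <;> simp [Nat.bit_val, h] <;> omega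
    have hn : 2 * (n <<< k) = Nat.bit false (n <<< k) := by simp [Nat.bit_val]
    rw [Nat.shiftLeft_succ, hn]
    conv_lhs => rw [hb]
    rw [Nat.lor_bit]
    have hr2 : r / 2 < 2 ^ k := by
      have : 2 ^ (k + 1) = 2 * 2 ^ k := by ring
      omega
    rw [Nat.bit_val, ih n (r / 2) hr2, pow_succ, mul_comm ((2:Nat) ^ k) 2, mul_assoc]
    rcases Nat.mod_two_eq_zero_or_one r with h | h <;> simp [h] <;> omega

theorem borShift (k : Nat) (a b : Int) (ha : 0 ≤ a) (hb : 0 ≤ b) (hlt : b < 2 ^ k) :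
    PySem.Int.bor (a <<< k) b = 2 ^ k * a + b := by
  have hcast : a <<< k = ((a.toNat <<< k : Nat) : Int) := by
    have : a = ((a.toNat : Nat) : Int) := by omega
    rw [this]; exact_mod_cast rfl
  have hsh : 0 ≤ a <<< k := by rw [hcast]; positivity
  rw [PySem.Int.bor_of_nonneg hsh hb]
  have htn : (a <<< k).toNat = a.toNat <<< k := by omega
  have hpow : ((2 ^ k : Nat) : Int) = 2 ^ k := by push_cast; ring
  have hbn : b.toNat < 2 ^ k := by omega
  have haa : ((a.toNat : Nat) : Int) = a := by omega
  have hbb : ((b.toNat : Nat) : Int) = b := by omega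
  rw [htn, natlor k a.toNat b.toNat hbn]
  push_cast [haa, hbb]
  norm_num

theorem L1 (ts w : Int) (hts : 0 ≤ ts) :
    List.foldl (fun ts b => PySem.Int.bor (ts <<< (1 : Nat)) b) ts (wordBits w)
      = PySem.Int.bor (ts <<< (5 : Nat)) (PySem.Int.band w 31) := by
  have e1 : ∀ a b : Int, 0 ≤ a → 0 ≤ b → b < 2 → PySem.Int.bor (a <<< (1 : Nat)) b = 2 * a + b := by
    intro a b ha hb0 hb2
    have h := borShift 1 a b ha hb0 (by norm_num; omega)
    norm_num at h
    exact h
  have h4 : PySem.Int.band (w >>> (4 : Nat)) 1 = w / 16 % 2 := by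
    have := bit_eq w 4; norm_num at this; exact this
  have h3 : PySem.Int.band (w >>> (3 : Nat)) 1 = w / 8 % 2 := by
    have := bit_eq w 3; norm_num at this; exact this
  have h2 : PySem.Int.band (w >>> (2 : Nat)) 1 = w / 4 % 2 := by
    have := bit_eq w 2; norm_num at this; exact this
  have h1 : PySem.Int.band (w >>> (1 : Nat)) 1 = w / 2 % 2 := by
    have := bit_eq w 1; norm_num at this; exact this
  have h0 : PySem.Int.band w 1 = w % 2 := by
    have := bit_eq w 0; norm_num at this; exact this
  rw [band31]
  have hR := borShift 5 ts (w % 32) hts (by omega) (by norm_num; omega)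
  norm_num at hR
  rw [hR]
  simp only [wordBits, List.foldl, Int.shiftRight_zero, h4, h3, h2, h1, h0]
  rw [e1 ts (w / 16 % 2) hts (by omega) (by omega)]
  rw [e1 (2 * ts + w / 16 % 2) (w / 8 % 2) (by omega) (by omega) (by omega)]
  rw [e1 (2 * (2 * ts + w / 16 % 2) + w / 8 % 2) (w / 4 % 2) (by omega) (by omega) (by omega)]
  rw [e1 (2 * (2 * (2 * ts + w / 16 % 2) + w / 8 % 2) + w / 4 % 2) (w / 2 % 2) (by omega) (by omega) (by omega)]
  rw [e1 (2 * (2 * (2 * (2 * ts + w / 16 % 2) + w / 8 % 2) + w / 4 % 2) + w / 2 % 2) (w % 2) (by omega) (by omega) (by omega)]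
  omega

theorem chunk : ∀ (ws : List Int) (ts : Int), 0 ≤ ts →
    (ws.flatMap wordBits).foldl (fun ts b => PySem.Int.bor (ts <<< (1 : Nat)) b) ts
      = ws.foldl (fun ts w => PySem.Int.bor (ts <<< (5 : Nat)) (PySem.Int.band w 31)) ts := by
  intro ws
  induction ws with
  | nil => intro ts _; rfl
  | cons w ws ih =>
    intro ts hts
    rw [List.flatMap_cons, List.foldl_append, List.foldl_cons, L1 ts w hts]
    apply ih
    rw [band31, borShift 5 ts (w % 32) hts (by omega) (by norm_num; omega)]
    omega

theorem buildlem : ∀ (ws : List Int) (acc : List Int),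
    ws.foldl
      (fun bits w =>
        (PySem.List.pyRange 4 (-1) (-1)).foldl
          (fun bits i => bits ++ [PySem.Int.band (w >>> i.toNat) 1]) bits) acc
      = acc ++ ws.flatMap wordBits := by
  intro ws
  have hr : PySem.List.pyRange 4 (-1) (-1) = [4, 3, 2, 1, 0] := by decide
  induction ws with
  | nil => intro acc; simp
  | cons w ws ih =>
    intro acc
    rw [List.foldl_cons, List.flatMap_cons, ih]
    rw [hr]
    simp only [List.foldl]
    norm_num [wordBits, show Int.toNat 4 = 4 from rfl, show Int.toNat 3 = 3 from rfl,
      show Int.toNat 2 = 2 from rfl, show Int.toNat 1 = 1 from rfl, show Int.toNat 0 = 0 from rfl]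

theorem len_flat : ∀ (ws : List Int), (ws.flatMap wordBits).length = 5 * ws.length := by
  intro ws
  induction ws with
  | nil => rfl
  | cons w ws ih => simp [List.flatMap_cons, wordBits, ih]; omega

-- ===== VERDICT (by name: the statement is the Claim_ definition above) =====
theorem decode_timestamp_py_spec : Claim_equal_decode_timestamp_py := by
  intro data _
  unfold Spec_decode_timestamp_py decode_timestamp_py decode_timestamp_py_alt
  by_cases h : data.length < 7
  · rw [if_pos h, if_pos h]
  · rw [if_neg h, if_neg h]
    dsimp only
    have hws : PySem.List.slice data none (some 7) = data.take 7 := by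
      rw [PySem.List.slice_to data (by norm_num : (0:Int) ≤ 7)]
      norm_num [show Int.toNat 7 = 7 by decide]
    rw [hws, buildlem (data.take 7) [], List.nil_append]
    have h7 : (data.take 7).length = 7 := by
      simp [List.length_take]
      omega
    have hlen : ((data.take 7).flatMap wordBits).length = 35 := by
      rw [len_flat, h7]
    have h35 : PySem.List.slice ((data.take 7).flatMap wordBits) none (some 35)
        = (data.take 7).flatMap wordBits := by
      rw [PySem.List.slice_to _ (by norm_num : (0:Int) ≤ 35)]
      rw [show Int.toNat 35 = 35 by decide]
      exact List.take_of_length_le (by omega)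
    rw [h35]
    exact chunk (data.take 7) 0 le_rfl
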